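-- pv_equiv track=rewrite | github.com/canonical/mir | tools/symbols_map_generator.py | is_operator_overload
-- ===== SOURCE A (Python) =====
-- def is_operator_overload(spelling: str):
--     operators = [
--         "+",
--         "-",
--         "*",
--         "/",
--         "%",
--         "^",
--         "&",
--         "|",
--         "~",
--         "!",
--         "=",
--         "<",
--         ">",
--         "+=",
--         "-=",
--         '*=',
--         "/=",
--         "%=",
--         "^=",
--         "&=",
--         "|=",
--         "<<",
--         ">>",
--         ">>=",
--         "<<=",
--         "==",
--         "!=",
--         "<=",
--         ">=",
--         "<=>",
--         "&&",
--         "||",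
--         "++",
--         "--",
--         ",",
--         "->*",
--         "->",
--         "()",
--         "[]"
--     ]
--
--     if spelling.startswith("operator "):
--         return True
--
--     for op in operators:
--         if spelling == f"operator{op}":
--             return True
--
--     return False
-- ===== SOURCE B (Python) =====
-- def _is_cpp_operator_token(op):
--     # rule-based recognizer: classify the token by length and shape
--     n = len(op)
--     if n == 1:
--         return op in "+-*/%^&|~!=<>,"
--     if n == 2:
--         if op[1] == "=":
--             return op[0] in "+-*/%^&|<>!="
--         return op in ("<<", ">>", "&&", "||", "++", "--", "->", "()", "[]")
--     if n == 3:
--         return op in (">>=", "<<=", "<=>", "->*")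
--     return False
--
--
-- def is_operator_overload(spelling: str):
--     if spelling.startswith("operator "):
--         return True
--     if not spelling.startswith("operator"):
--         return False
--     return _is_cpp_operator_token(spelling[len("operator"):])
-- ===== Notes on version B (the rewrite author's own statement) =====
-- stated objective: alternative
-- what changed: A scans a 39-entry list comparing the spelling against the prefix-plus-op concatenation for each entry; B strips the fixed prefix once and recognizes the remaining token with a rule-based classifier (length dispatch, then shape rules: single-char membership, compound assignments ending in =, doubled symbols and the few irregular tokens).
import Mathlib
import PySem

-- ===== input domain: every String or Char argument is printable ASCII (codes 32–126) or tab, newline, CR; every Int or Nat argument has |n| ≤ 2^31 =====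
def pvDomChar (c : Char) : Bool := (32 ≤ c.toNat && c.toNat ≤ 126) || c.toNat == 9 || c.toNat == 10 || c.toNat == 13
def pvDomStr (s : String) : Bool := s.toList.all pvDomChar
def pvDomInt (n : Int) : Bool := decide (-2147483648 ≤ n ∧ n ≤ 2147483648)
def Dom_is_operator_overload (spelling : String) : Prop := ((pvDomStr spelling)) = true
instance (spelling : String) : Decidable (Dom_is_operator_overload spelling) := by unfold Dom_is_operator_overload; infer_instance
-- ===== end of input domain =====

-- B replaces A's 39-entry scan comparing spelling with "operator"+op by a rule-based
-- recognizer that classifies the suffix by length and character shape; objective: alternative.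


-- ===== PORT A =====
-- the local list `operators`, in A's order
def pvOperatorsA : List String :=
  ["+", "-", "*", "/", "%", "^", "&", "|", "~", "!", "=", "<", ">",
   "+=", "-=", "*=", "/=", "%=", "^=", "&=", "|=", "<<", ">>", ">>=",
   "<<=", "==", "!=", "<=", ">=", "<=>", "&&", "||", "++", "--", ",",
   "->*", "->", "()", "[]"]

-- the for-loop with early return is List.any; f"operator{op}" is exact string
-- concatenation, built as String.ofList of the concatenated code points
def is_operator_overload (spelling : String) : Bool :=
  if PySem.Str.startswith spelling "operator " then true
  else pvOperatorsA.any (fun op => spelling == String.ofList ("operator".toList ++ op.toList))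

-- ===== PORT B =====
-- Source B's helper _is_cpp_operator_token on the suffix's code points; Python's
-- `op in "<chars>"` for a one-char op is exactly membership of the char, and
-- `op in (<tuples>)` is the written disjunction of equalities (exact on all inputs)
def pvIsCppOperatorToken (op : List Char) : Bool :=
  match op with
  | [a] => ['+','-','*','/','%','^','&','|','~','!','=','<','>',','].contains a
  | [a, b] =>
      if b == '=' then ['+','-','*','/','%','^','&','|','=','!','<','>'].contains a
      else [a,b] == ['<','<'] || [a,b] == ['>','>'] || [a,b] == ['&','&']
           || [a,b] == ['|','|'] || [a,b] == ['+','+'] || [a,b] == ['-','-']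
           || [a,b] == ['-','>'] || [a,b] == ['(',')'] || [a,b] == ['[',']']
  | [a, b, c] =>
      [a,b,c] == ['>','>','='] || [a,b,c] == ['<','<','=']
      || [a,b,c] == ['<','=','>'] || [a,b,c] == ['-','>','*']
  | _ => false

-- spelling[len("operator"):] is the slice from 8
def is_operator_overload_alt (spelling : String) : Bool :=
  if PySem.Str.startswith spelling "operator " then true
  else if !(PySem.Str.startswith spelling "operator") then false
  else pvIsCppOperatorToken (PySem.Str.slice spelling (some 8) none).toList

-- ===== PRECONDITION & SPEC =====
def Spec_is_operator_overload (spelling : String) (out : Bool) : Prop := out = is_operator_overload_alt spelling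
instance (spelling : String) (out : Bool) : Decidable (Spec_is_operator_overload spelling out) := by unfold Spec_is_operator_overload; infer_instance

-- ===== CLAIM =====
def Claim_equal_is_operator_overload : Prop := ∀ (spelling : String), Dom_is_operator_overload spelling → Spec_is_operator_overload spelling (is_operator_overload spelling)

-- ===== LEMMAS AND PROOFS =====

-- one comparison of A's loop: s = "operator"+op iff "operator" ≤p s and s[8:] = op
theorem pv_elem_eq (s op : String) :
    (s == String.ofList ("operator".toList ++ op.toList))
      = (PySem.Str.startswith s "operator"
         && (PySem.Str.slice s (some 8) none == op)) := by
  rw [Bool.eq_iff_iff]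
  simp only [beq_iff_eq, Bool.and_eq_true]
  rw [show ((PySem.Str.startswith s "operator") = true) ↔ "operator".toList <+: s.toList from by
        simp [PySem.Chars.startswith_iff]]
  rw [show (PySem.Str.slice s (some 8) none = op) ↔ s.toList.drop 8 = op.toList from by
        rw [← String.toList_inj]; simp [pysem]]
  rw [show (s = String.ofList ("operator".toList ++ op.toList)) ↔
        s.toList = "operator".toList ++ op.toList from by
        rw [← String.toList_inj, String.toList_ofList]]
  constructor
  · intro he
    exact ⟨by rw [he]; exact List.prefix_append _ _,
           by rw [he]; exact List.drop_left' (by decide)⟩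
  · rintro ⟨⟨t, ht⟩, hd⟩
    have h8 : s.toList.drop 8 = t := by rw [← ht]; exact List.drop_left' (by decide)
    rw [← ht, ← hd, h8]

-- string equality is equality of the character lists
theorem pv_str_beq (t op : String) : (t == op) = (t.toList == op.toList) := by
  rw [Bool.eq_iff_iff]; simp [String.toList_inj]

-- membership of a char list in A's operator list equals B's rule-based classifier
theorem pv_classify_eq_list (l : List Char) :
    pvOperatorsA.any (fun op => l == op.toList) = pvIsCppOperatorToken l := by
  match l with
  | [] => simp [pvOperatorsA, pvIsCppOperatorToken]
  | [a] =>
      simp only [pvOperatorsA, pvIsCppOperatorToken, List.any_cons, List.any_nil]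
      rw [Bool.eq_iff_iff]; simp
  | [a, b] =>
      simp only [pvOperatorsA, pvIsCppOperatorToken, List.any_cons, List.any_nil]
      rw [Bool.eq_iff_iff]
      by_cases hb : b = '='
      · subst hb; simp [or_assoc]
      · simp [hb, or_assoc]
  | [a, b, c] =>
      simp only [pvOperatorsA, pvIsCppOperatorToken, List.any_cons, List.any_nil]
      rw [Bool.eq_iff_iff]; simp [or_assoc]
  | a :: b :: c :: d :: rest =>
      simp [pvOperatorsA, pvIsCppOperatorToken]

theorem pv_classify_eq (t : String) :
    pvOperatorsA.any (fun op => t == op) = pvIsCppOperatorToken t.toList := by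
  simp only [pv_str_beq]
  exact pv_classify_eq_list t.toList

theorem pv_any_const (x : Bool) (f : String → Bool) (l : List String) :
    (l.any fun o => x && f o) = (x && l.any f) := by
  cases x <;> simp

theorem is_operator_overload_eq (s : String) :
    is_operator_overload s = is_operator_overload_alt s := by
  unfold is_operator_overload is_operator_overload_alt
  cases h : PySem.Str.startswith s "operator " with
  | true => simp
  | false =>
    rw [if_neg (by simp [h]), if_neg (by simp [h])]
    simp only [pv_elem_eq, pv_any_const, pv_classify_eq]
    cases h2 : PySem.Str.startswith s "operator" <;> simp

-- ===== VERDICT =====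
theorem is_operator_overload_spec : Claim_equal_is_operator_overload := by
  intro s _
  unfold Spec_is_operator_overload
  exact is_operator_overload_eq s
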